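-- pv_equiv track=rewrite | github.com/QwQ-maker/4box | sbox_analysis.py | max_linear_approximation
-- ===== SOURCE A (Python) =====
-- def hamming_weight(val):
--     """计算整数的汉明重量（二进制中1的个数）"""
--     count = 0
--     while val:
--         count += val & 1
--         val >>= 1
--     return count
--
-- def inner_product(a, b, n):
--     """计算两个n比特整数的内积（模2）"""
--     return hamming_weight(a & b) % 2
--
-- def linear_approximation_table(sbox, n, m):
--     """
--     构造线性逼近表（LAT）
--     输出：2^n × 2^m 的二维列表
--     """
--     size_in = 1 << n
--     size_out = 1 << m
--     lat = [[0] * size_out for _ in range(size_in)]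
--
--     for a in range(size_in):
--         for b in range(size_out):
--             count = 0
--             for x in range(size_in):
--                 if inner_product(a, x, n) == inner_product(b, sbox[x], m):
--                     count += 1
--             lat[a][b] = count - (size_in >> 1)
--
--     return lat
--
-- def max_linear_approximation(sbox, n, m):
--     """计算S盒的最大线性逼近优势"""
--     lat = linear_approximation_table(sbox, n, m)
--     size_in = 1 << n
--     size_out = 1 << m
--     max_val = 0
--     for a in range(size_in):
--         for b in range(1, size_out):  # 排除b=0
--             if abs(lat[a][b]) > max_val:
--                 max_val = abs(lat[a][b])
--     return max_val
-- ===== SOURCE B (Python) =====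
-- def _fwht(v):
--     """Recursive fast Walsh-Hadamard transform: w[a] = sum_x (-1)^{<a,x>} v[x]."""
--     if len(v) <= 1:
--         return v
--     h = len(v) // 2
--     l = _fwht(v[:h])
--     r = _fwht(v[h:])
--     return [l[i] + r[i] for i in range(h)] + [l[i] - r[i] for i in range(h)]
--
-- def max_linear_approximation(sbox, n, m):
--     """Max |LAT entry| over all masks (a, b) with b != 0, via one FWHT per output mask."""
--     size_in = 1 << n
--     best = 0
--     for b in range(1, 1 << m):
--         signs = [-1 if (b & sbox[x]).bit_count() & 1 else 1 for x in range(size_in)]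
--         for w in _fwht(signs):
--             c = abs((w + size_in) // 2 - (size_in >> 1))
--             if c > best:
--                 best = c
--     return best
-- ===== Notes on version B (the rewrite author's own statement) =====
-- stated objective: faster
-- what changed: Replaces the O(2^(2n+m)) brute-force LAT construction (for every mask pair (a,b) a full scan over all 2^n inputs) by one fast Walsh-Hadamard transform per output mask b, which yields the whole column of correlations at once.
import Mathlib
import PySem

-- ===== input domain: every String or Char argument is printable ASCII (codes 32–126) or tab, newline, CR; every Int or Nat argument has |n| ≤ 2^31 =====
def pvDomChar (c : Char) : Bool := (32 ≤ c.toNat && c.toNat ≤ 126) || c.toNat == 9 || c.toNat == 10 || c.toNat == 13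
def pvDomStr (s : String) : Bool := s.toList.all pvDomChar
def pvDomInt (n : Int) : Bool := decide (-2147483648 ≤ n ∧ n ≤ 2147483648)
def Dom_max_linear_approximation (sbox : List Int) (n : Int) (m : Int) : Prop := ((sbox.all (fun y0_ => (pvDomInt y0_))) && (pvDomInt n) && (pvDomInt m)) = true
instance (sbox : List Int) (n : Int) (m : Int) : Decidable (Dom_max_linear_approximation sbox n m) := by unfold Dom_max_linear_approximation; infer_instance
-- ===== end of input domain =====

-- B replaces A's brute-force LAT construction by one fast Walsh-Hadamard transform per
-- output mask (objective: faster, asymptotically fewer operations).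

-- ===== PORT A =====

-- while val: count += val & 1; val >>= 1  — structural recursion on the Nat value.
-- A only calls hamming_weight on nonnegative arguments (a & b with a ≥ 0), where .toNat is exact.
-- structural recursion on a fuel bound (fuel = the value itself bounds the halvings)
def hwGo : Nat → Nat → Int
  | _, 0 => 0
  | 0, _ + 1 => 0
  | fuel + 1, v + 1 => (((v + 1) % 2 : Nat) : Int) + hwGo fuel ((v + 1) / 2)

def hamming_weight (val : Int) : Int := hwGo val.toNat val.toNat

def inner_product (a b : Int) (_n : Int) : Int :=
  PySem.Int.mod (hamming_weight (PySem.Int.band a b)) 2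

-- lat[a][b] = count - (size_in >> 1); sbox[x] raises IndexError when 2^n > len(sbox) (excluded by Pre_).
def linear_approximation_table (sbox : List Int) (n : Int) (m : Int) : List (List Int) :=
  let size_in : Nat := 2 ^ n.toNat    -- 1 << n; exact for 0 ≤ n (Pre_), Python raises on n < 0
  let size_out : Nat := 2 ^ m.toNat
  (List.range size_in).map (fun (a : Nat) =>
    (List.range size_out).map (fun (b : Nat) =>
      let count : Int := (List.range size_in).foldl (fun (c : Int) (x : Nat) =>
        if inner_product (a : Int) (x : Int) n
            = inner_product (b : Int) ((PySem.List.pyGet? sbox (x : Int)).getD 0) m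
        then c + 1 else c) 0
      count - ((size_in >>> 1 : Nat) : Int)))

def max_linear_approximation (sbox : List Int) (n : Int) (m : Int) : Int :=
  let lat := linear_approximation_table sbox n m
  let size_in : Nat := 2 ^ n.toNat
  let size_out : Nat := 2 ^ m.toNat
  (List.range size_in).foldl (fun (mv : Int) (a : Nat) =>
    (List.range' 1 (size_out - 1)).foldl (fun (mv : Int) (b : Nat) =>
      if |(lat.getD a []).getD b 0| > mv then |(lat.getD a []).getD b 0| else mv) mv) 0

-- ===== PORT B =====

-- recursive FWHT, exactly Source B's _fwht: split in half, recurse, recombine.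
-- Structural recursion on a fuel bound; fuel = the list length bounds the recursion depth
-- (the recursion halves the length, so length many steps always suffice).
def fwhtGo : Nat → List Int → List Int
  | 0, v => v
  | fuel + 1, v =>
    if v.length ≤ 1 then v
    else
      let h := v.length / 2
      let l := fwhtGo fuel (v.take h)
      let r := fwhtGo fuel (v.drop h)
      ((List.range h).map (fun i => l.getD i 0 + r.getD i 0)) ++
      ((List.range h).map (fun i => l.getD i 0 - r.getD i 0))

def fwht (v : List Int) : List Int := fwhtGo v.length v

-- (x).bit_count() & 1 is ported as PySem.Int.bitCount x % 2 (& 1 = % 2 on a Nat)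
def max_linear_approximation_alt (sbox : List Int) (n : Int) (m : Int) : Int :=
  let size_in : Nat := 2 ^ n.toNat    -- 1 << n
  (List.range' 1 (2 ^ m.toNat - 1)).foldl (fun (best : Int) (b : Nat) =>
    let signs := (List.range size_in).map (fun (x : Nat) =>
      if PySem.Int.bitCount (PySem.Int.band (b : Int) ((PySem.List.pyGet? sbox (x : Int)).getD 0)) % 2 = 1
      then (-1 : Int) else 1)
    (fwht signs).foldl (fun (best : Int) (w : Int) =>
      let c := |PySem.Int.floordiv (w + (size_in : Int)) 2 - ((size_in >>> 1 : Nat) : Int)|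
      if c > best then c else best) best) 0

-- ===== PRECONDITION & SPEC =====
-- Pre_ excludes exactly the inputs where the Python A raises: 1 << n / 1 << m raise ValueError for
-- negative n or m, and sbox[x] raises IndexError when sbox is shorter than 2^n.
def Pre_max_linear_approximation (sbox : List Int) (n : Int) (m : Int) : Prop :=
  0 ≤ n ∧ 0 ≤ m ∧ 2 ^ n.toNat ≤ sbox.length
instance (sbox : List Int) (n : Int) (m : Int) : Decidable (Pre_max_linear_approximation sbox n m) := by
  unfold Pre_max_linear_approximation; infer_instance

def pvWitness_max_linear_approximation : List Int × Int × Int := ([2, 0, 3, 1], 2, 2)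

def Spec_max_linear_approximation (sbox : List Int) (n : Int) (m : Int) (out : Int) : Prop := out = max_linear_approximation_alt sbox n m
instance (sbox : List Int) (n : Int) (m : Int) (out : Int) : Decidable (Spec_max_linear_approximation sbox n m out) := by unfold Spec_max_linear_approximation; infer_instance

-- ===== CLAIM (what is proved, stated in full; the proofs are below) =====
def Claim_equal_max_linear_approximation : Prop := ∀ (sbox : List Int) (n : Int) (m : Int), Dom_max_linear_approximation sbox n m → Pre_max_linear_approximation sbox n m → Spec_max_linear_approximation sbox n m (max_linear_approximation sbox n m)

-- ===== LEMMAS AND PROOFS =====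

-- parity of the binary weight, the common abstraction of A's hamming_weight % 2 and B's bit_count() & 1
def parb (v : Nat) : Bool :=
  if v = 0 then false else (decide (v % 2 = 1)).xor (parb (v / 2))
termination_by v
decreasing_by exact Nat.div_lt_self (by omega) (by omega)

theorem parb_zero : parb 0 = false := by rw [parb]; norm_num

theorem parb_rec (v : Nat) : parb v = (decide (v % 2 = 1)).xor (parb (v / 2)) := by
  by_cases h : v = 0
  · subst h; simp [parb_zero]
  · rw [parb, if_neg h]

theorem hwGo_mod_two : ∀ (fuel v : Nat), v ≤ fuel →
    hwGo fuel v % 2 = if parb v then (1 : Int) else 0 := by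
  intro fuel
  induction fuel with
  | zero =>
    intro v hv
    have hv0 : v = 0 := by omega
    subst hv0
    simp [hwGo, parb_zero]
  | succ f ih =>
    intro v hv
    match v with
    | 0 => simp [hwGo, parb_zero]
    | w + 1 =>
      have hle : (w + 1) / 2 ≤ f := by omega
      rw [hwGo, Int.add_emod, ih _ hle, parb_rec (w + 1)]
      rcases Nat.mod_two_eq_zero_or_one (w + 1) with hr | hr <;> rw [hr] <;>
        cases hpq : parb ((w + 1) / 2) <;> simp

theorem bitCount_parb (t : Nat) :
    (PySem.Int.bitCount (t : Int) % 2 = 1) ↔ parb t = true := by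
  induction t using Nat.strong_induction_on with
  | _ t ih =>
    match t with
    | 0 => simp [PySem.Int.bitCount_zero, parb_zero]
    | w + 1 =>
      have hq := ih ((w + 1) / 2) (Nat.div_lt_self (by omega) (by omega))
      rw [PySem.Int.bitCount_natCast (by omega), Nat.add_mod, parb_rec (w + 1)]
      rcases Nat.mod_two_eq_zero_or_one (w + 1) with hr | hr <;> rw [hr] <;>
        cases hpq : parb ((w + 1) / 2) <;> simp [hpq] at hq ⊢ <;> omega

-- high-bit facts
theorem tb_high {a k i : Nat} (ha : a < 2 ^ k) (hik : k ≤ i) : a.testBit i = false :=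
  Nat.testBit_lt_two_pow (lt_of_lt_of_le ha (Nat.pow_le_pow_right (by omega) hik))

theorem tb_add {a k : Nat} (ha : a < 2 ^ k) (i : Nat) :
    (2 ^ k + a).testBit i = if i = k then true else a.testBit i := by
  rcases lt_trichotomy i k with h | h | h
  · rw [Nat.testBit_two_pow_add_gt h, if_neg (by omega)]
  · subst h; rw [Nat.testBit_two_pow_add_eq, Nat.testBit_lt_two_pow ha, if_pos rfl]; rfl
  · have h1 : (2 : Nat) ^ (k + 1) = 2 * 2 ^ k := by rw [Nat.pow_succ]; ring
    rw [if_neg (by omega), tb_high ha (by omega),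
      tb_high (a := 2 ^ k + a) (k := k + 1) (by omega) (by omega)]

theorem and_add_left {k a x : Nat} (ha : a < 2 ^ k) (hx : x < 2 ^ k) :
    (2 ^ k + a) &&& x = a &&& x := by
  apply Nat.eq_of_testBit_eq; intro i
  rw [Nat.testBit_and, Nat.testBit_and, tb_add ha]
  by_cases h : i = k
  · subst h; rw [Nat.testBit_lt_two_pow hx]; simp
  · rw [if_neg h]

theorem and_add_right {k a x : Nat} (ha : a < 2 ^ k) (hx : x < 2 ^ k) :
    a &&& (2 ^ k + x) = a &&& x := by
  rw [Nat.and_comm, and_add_left hx ha, Nat.and_comm]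

theorem and_add_add {k a x : Nat} (ha : a < 2 ^ k) (hx : x < 2 ^ k) :
    (2 ^ k + a) &&& (2 ^ k + x) = 2 ^ k + (a &&& x) := by
  apply Nat.eq_of_testBit_eq; intro i
  have hand : a &&& x < 2 ^ k := lt_of_le_of_lt Nat.and_le_left ha
  rw [Nat.testBit_and, tb_add ha, tb_add hx, tb_add hand]
  by_cases h : i = k
  · simp [h]
  · rw [if_neg h, if_neg h, if_neg h, Nat.testBit_and]

theorem parb_add_pow (k : Nat) : ∀ t, t < 2 ^ k → parb (2 ^ k + t) = !parb t := by
  induction k with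
  | zero =>
    intro t ht
    interval_cases t
    have e1 : (2 : Nat) ^ 0 + 0 = 1 := rfl
    have e2 : (1 : Nat) / 2 = 0 := rfl
    rw [e1, parb_rec 1, e2, parb_zero]; rfl
  | succ k ih =>
    intro t ht
    have h2 : (2 : Nat) ^ (k + 1) = 2 * 2 ^ k := by rw [Nat.pow_succ]; ring
    rw [parb_rec (2 ^ (k + 1) + t), parb_rec t]
    have e1 : (2 ^ (k + 1) + t) % 2 = t % 2 := by omega
    have e2 : (2 ^ (k + 1) + t) / 2 = 2 ^ k + t / 2 := by omega
    rw [e1, e2, ih (t / 2) (by omega)]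
    cases decide (t % 2 = 1) <;> cases parb (t / 2) <;> rfl

-- the Walsh character
def chi (a x : Nat) : Int := if parb (a &&& x) then -1 else 1

theorem chi_hi_lo {k a x : Nat} (ha : a < 2 ^ k) (hx : x < 2 ^ k) :
    chi (2 ^ k + a) x = chi a x := by unfold chi; rw [and_add_left ha hx]

theorem chi_lo_hi {k a x : Nat} (ha : a < 2 ^ k) (hx : x < 2 ^ k) :
    chi a (2 ^ k + x) = chi a x := by unfold chi; rw [and_add_right ha hx]

theorem chi_hi_hi {k a x : Nat} (ha : a < 2 ^ k) (hx : x < 2 ^ k) :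
    chi (2 ^ k + a) (2 ^ k + x) = -chi a x := by
  unfold chi
  rw [and_add_add ha hx, parb_add_pow k _ (lt_of_le_of_lt Nat.and_le_left ha)]
  cases parb (a &&& x) <;> simp

-- FWHT computes the Walsh spectrum
theorem fwhtGo_spec (k : Nat) : ∀ (fuel : Nat) (v : List Int), v.length = 2 ^ k → 2 ^ k ≤ fuel + 1 →
    (fwhtGo fuel v).length = 2 ^ k ∧
    ∀ a, a < 2 ^ k → (fwhtGo fuel v).getD a 0 = ∑ x ∈ Finset.range (2 ^ k), chi a x * v.getD x 0 := by
  induction k with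
  | zero =>
    intro fuel v hv _
    have hid : fwhtGo fuel v = v := by
      match fuel with
      | 0 => rw [fwhtGo]
      | f + 1 => rw [fwhtGo, if_pos (by omega)]
    rw [hid]
    refine ⟨hv, ?_⟩
    intro a ha
    have h1 : (2 : Nat) ^ 0 = 1 := rfl
    rw [h1] at ha ⊢
    interval_cases a
    rw [Finset.sum_range_one]
    have hchi : chi 0 0 = 1 := by simp [chi, parb_zero]
    rw [hchi, one_mul]
  | succ k ih =>
    intro fuel v hv hfuel
    have h2 : (2 : Nat) ^ (k + 1) = 2 ^ k + 2 ^ k := by rw [Nat.pow_succ]; ring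
    have hpos : 0 < (2 : Nat) ^ k := by positivity
    obtain ⟨f, rfl⟩ : ∃ f, fuel = f + 1 := ⟨fuel - 1, by omega⟩
    have hnot : ¬ v.length ≤ 1 := by omega
    have hh : v.length / 2 = 2 ^ k := by omega
    rw [fwhtGo, if_neg hnot, hh]
    have htake : (v.take (2 ^ k)).length = 2 ^ k := by
      rw [List.length_take]; omega
    have hdrop : (v.drop (2 ^ k)).length = 2 ^ k := by
      rw [List.length_drop]; omega
    have hfu : 2 ^ k ≤ f + 1 := by omega
    obtain ⟨hlLen, hls⟩ := ih f _ htake hfu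
    obtain ⟨hrLen, hrs⟩ := ih f _ hdrop hfu
    have hTake : ∀ x, x < 2 ^ k → (v.take (2 ^ k)).getD x 0 = v.getD x 0 := by
      intro x hx
      rw [List.getD_eq_getElem?_getD, List.getD_eq_getElem?_getD, List.getElem?_take, if_pos hx]
    have hDrop : ∀ x, x < 2 ^ k → (v.drop (2 ^ k)).getD x 0 = v.getD (2 ^ k + x) 0 := by
      intro x hx
      rw [List.getD_eq_getElem?_getD, List.getD_eq_getElem?_getD, List.getElem?_drop]
    constructor
    · simp only [List.length_append, List.length_map, List.length_range]; omega
    · intro a ha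
      rw [h2, Finset.sum_range_add]
      by_cases hc : a < 2 ^ k
      · rw [List.getD_eq_getElem?_getD,
          List.getElem?_append_left (by simpa using hc),
          List.getElem?_map, List.getElem?_range hc]
        simp only [Option.map_some, Option.getD_some]
        rw [hls a hc, hrs a hc]
        refine congrArg₂ (· + ·) (Finset.sum_congr rfl fun x hx => ?_)
          (Finset.sum_congr rfl fun x hx => ?_)
        · rw [hTake x (Finset.mem_range.mp hx)]
        · rw [hDrop x (Finset.mem_range.mp hx),
            chi_lo_hi hc (Finset.mem_range.mp hx)]
      · have ha' : a - 2 ^ k < 2 ^ k := by omega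
        have haa : a = 2 ^ k + (a - 2 ^ k) := by omega
        rw [List.getD_eq_getElem?_getD,
          List.getElem?_append_right (by simpa using (by omega : 2 ^ k ≤ a)),
          List.getElem?_map]
        simp only [List.length_map, List.length_range]
        rw [List.getElem?_range ha']
        simp only [Option.map_some, Option.getD_some]
        rw [hls _ ha', hrs _ ha']
        conv_rhs => rw [haa]
        rw [sub_eq_add_neg, ← Finset.sum_neg_distrib]
        refine congrArg₂ (· + ·) (Finset.sum_congr rfl fun x hx => ?_)
          (Finset.sum_congr rfl fun x hx => ?_)
        · rw [hTake x (Finset.mem_range.mp hx),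
            chi_hi_lo ha' (Finset.mem_range.mp hx)]
        · rw [hDrop x (Finset.mem_range.mp hx),
            chi_hi_hi ha' (Finset.mem_range.mp hx), neg_mul]

theorem fwht_spec (k : Nat) : ∀ v : List Int, v.length = 2 ^ k →
    (fwht v).length = 2 ^ k ∧
    ∀ a, a < 2 ^ k → (fwht v).getD a 0 = ∑ x ∈ Finset.range (2 ^ k), chi a x * v.getD x 0 := by
  intro v hv
  have h := fwhtGo_spec k v.length v hv (by omega)
  simpa only [fwht] using h

-- loop-to-sum and sign bookkeeping
theorem foldl_count (p : Nat → Prop) [DecidablePred p] (S : Nat) :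
    (List.range S).foldl (fun (c : Int) x => if p x then c + 1 else c) 0
      = ∑ x ∈ Finset.range S, (if p x then (1 : Int) else 0) := by
  induction S with
  | zero => simp
  | succ S ih =>
    rw [List.range_succ, List.foldl_append, ih, Finset.sum_range_succ]
    simp only [List.foldl_cons, List.foldl_nil]
    split_ifs <;> simp

theorem pv_sign_mul (p q : Bool) :
    (if p then (-1 : Int) else 1) * (if q then (-1 : Int) else 1)
      = 2 * (if p = q then (1 : Int) else 0) - 1 := by
  cases p <;> cases q <;> norm_num

def tVal (sbox : List Int) (b x : Nat) : Nat :=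
  (PySem.Int.band (b : Int) ((PySem.List.pyGet? sbox (x : Int)).getD 0)).toNat

def cnt (sbox : List Int) (SI a b : Nat) : Int :=
  ∑ x ∈ Finset.range SI, (if parb (a &&& x) = parb (tVal sbox b x) then (1 : Int) else 0)

theorem ip_left (a x : Nat) (n : Int) :
    inner_product (a : Int) (x : Int) n = if parb (a &&& x) then (1 : Int) else 0 := by
  unfold inner_product hamming_weight
  rw [PySem.Int.band_natCast, PySem.Int.mod_eq_emod_of_pos (by norm_num)]
  rw [Int.toNat_natCast]
  exact hwGo_mod_two _ _ (le_refl _)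

theorem ip_right (b : Nat) (s : Int) (m : Int) :
    inner_product (b : Int) s m
      = if parb (PySem.Int.band (b : Int) s).toNat then (1 : Int) else 0 := by
  unfold inner_product hamming_weight
  rw [PySem.Int.mod_eq_emod_of_pos (by norm_num)]
  exact hwGo_mod_two _ _ (le_refl _)

-- the LAT entry of port A as a closed sum
theorem latEntry (sbox : List Int) (n m : Int) (a bb : Nat)
    (ha : a < 2 ^ n.toNat) (hb : bb < 2 ^ m.toNat) :
    ((linear_approximation_table sbox n m).getD a []).getD bb 0
      = cnt sbox (2 ^ n.toNat) a bb - ((2 ^ n.toNat >>> 1 : Nat) : Int) := by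
  simp only [linear_approximation_table]
  rw [PySem.List.getD_map_range _ _ _ _ ha, PySem.List.getD_map_range _ _ _ _ hb]
  congr 1
  rw [foldl_count (fun x => inner_product (a : Int) (x : Int) n
      = inner_product (bb : Int) ((PySem.List.pyGet? sbox (x : Int)).getD 0) m) (2 ^ n.toNat)]
  unfold cnt
  refine Finset.sum_congr rfl fun x hx => ?_
  rw [ip_left, ip_right]
  unfold tVal
  cases hp : parb (a &&& x) <;>
    cases hq : parb (PySem.Int.band (bb : Int) ((PySem.List.pyGet? sbox (x : Int)).getD 0)).toNat <;>
      simp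

-- the Walsh coefficient of port B's sign vector as the same sum
theorem wVal (sbox : List Int) (n : Int) (bb a : Nat) (ha : a < 2 ^ n.toNat) :
    (fwht ((List.range (2 ^ n.toNat)).map (fun (x : Nat) =>
        if PySem.Int.bitCount (PySem.Int.band (bb : Int) ((PySem.List.pyGet? sbox (x : Int)).getD 0)) % 2 = 1
        then (-1 : Int) else 1))).getD a 0
      = 2 * cnt sbox (2 ^ n.toNat) a bb - ((2 ^ n.toNat : Nat) : Int) := by
  obtain ⟨hlen, hspec⟩ := fwht_spec n.toNat
    ((List.range (2 ^ n.toNat)).map (fun (x : Nat) =>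
        if PySem.Int.bitCount (PySem.Int.band (bb : Int) ((PySem.List.pyGet? sbox (x : Int)).getD 0)) % 2 = 1
        then (-1 : Int) else 1)) (by simp)
  rw [hspec a ha]
  have hsig : ∀ x, x < 2 ^ n.toNat →
      ((List.range (2 ^ n.toNat)).map (fun (x : Nat) =>
        if PySem.Int.bitCount (PySem.Int.band (bb : Int) ((PySem.List.pyGet? sbox (x : Int)).getD 0)) % 2 = 1
        then (-1 : Int) else 1)).getD x 0
      = (if parb (tVal sbox bb x) then (-1 : Int) else 1) := by
    intro x hx
    rw [PySem.List.getD_map_range _ _ _ _ hx]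
    have hnn : 0 ≤ PySem.Int.band (bb : Int) ((PySem.List.pyGet? sbox (x : Int)).getD 0) :=
      PySem.Int.band_nonneg_of_nonneg_left _ (by positivity)
    have hcast : PySem.Int.band (bb : Int) ((PySem.List.pyGet? sbox (x : Int)).getD 0)
        = ((tVal sbox bb x : Nat) : Int) := by
      unfold tVal; rw [Int.toNat_of_nonneg hnn]
    rw [hcast]
    by_cases hpt : parb (tVal sbox bb x) = true
    · rw [if_pos ((bitCount_parb _).mpr hpt), if_pos hpt]
    · rw [if_neg (fun hc => hpt ((bitCount_parb _).mp hc)), if_neg hpt]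
  have hterm : ∀ x ∈ Finset.range (2 ^ n.toNat),
      chi a x * ((List.range (2 ^ n.toNat)).map (fun (x : Nat) =>
        if PySem.Int.bitCount (PySem.Int.band (bb : Int) ((PySem.List.pyGet? sbox (x : Int)).getD 0)) % 2 = 1
        then (-1 : Int) else 1)).getD x 0
      = 2 * (if parb (a &&& x) = parb (tVal sbox bb x) then (1 : Int) else 0) - 1 := by
    intro x hx
    rw [hsig x (Finset.mem_range.mp hx)]
    unfold chi
    exact pv_sign_mul _ _
  rw [Finset.sum_congr rfl hterm]
  rw [Finset.sum_sub_distrib, ← Finset.mul_sum, Finset.sum_const, Finset.card_range]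
  unfold cnt
  simp

-- running max of a loop body `if v > acc then v else acc`
theorem ifmax_le {α : Type} (f : α → Int) (l : List α) : ∀ z c : Int, z ≤ c →
    (∀ x ∈ l, f x ≤ c) →
    l.foldl (fun acc x => if f x > acc then f x else acc) z ≤ c := by
  induction l with
  | nil => intro z c hz _; simpa using hz
  | cons hd tl ih =>
    intro z c hz hf
    simp only [List.foldl_cons]
    refine ih _ _ ?_ (fun x hx => hf x (List.mem_cons_of_mem _ hx))
    have := hf hd (by simp)
    split_ifs <;> omega

theorem le_ifmax {α : Type} (f : α → Int) (l : List α) : ∀ z : Int,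
    z ≤ l.foldl (fun acc x => if f x > acc then f x else acc) z := by
  induction l with
  | nil => intro z; simp
  | cons hd tl ih =>
    intro z
    simp only [List.foldl_cons]
    refine le_trans ?_ (ih _)
    split_ifs <;> omega

theorem mem_ifmax {α : Type} (f : α → Int) (l : List α) (x : α) (hx : x ∈ l) (z : Int) :
    f x ≤ l.foldl (fun acc x => if f x > acc then f x else acc) z := by
  obtain ⟨s, t, rfl⟩ := List.append_of_mem hx
  rw [List.foldl_append]
  simp only [List.foldl_cons]
  refine le_trans ?_ (le_ifmax f t _)
  split_ifs <;> omega

theorem nested_le {α β : Type} (g : α → β → Int) (L2 : α → List β) (l1 : List α) :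
    ∀ z c : Int, z ≤ c → (∀ a ∈ l1, ∀ b ∈ L2 a, g a b ≤ c) →
    l1.foldl (fun mv a => (L2 a).foldl (fun mv b => if g a b > mv then g a b else mv) mv) z ≤ c := by
  induction l1 with
  | nil => intro z c hz _; simpa using hz
  | cons hd tl ih =>
    intro z c hz hg
    simp only [List.foldl_cons]
    exact ih _ _ (ifmax_le _ _ _ _ hz (hg hd (by simp)))
      (fun a ha b hb => hg a (by simp [ha]) b hb)

theorem le_nested {α β : Type} (g : α → β → Int) (L2 : α → List β) (l1 : List α) :
    ∀ z : Int,
    z ≤ l1.foldl (fun mv a => (L2 a).foldl (fun mv b => if g a b > mv then g a b else mv) mv) z := by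
  induction l1 with
  | nil => intro z; simp
  | cons hd tl ih =>
    intro z
    simp only [List.foldl_cons]
    exact le_trans (le_ifmax _ _ _) (ih _)

theorem mem_nested {α β : Type} (g : α → β → Int) (L2 : α → List β) (l1 : List α)
    (a : α) (ha : a ∈ l1) (b : β) (hb : b ∈ L2 a) (z : Int) :
    g a b ≤ l1.foldl (fun mv a => (L2 a).foldl (fun mv b => if g a b > mv then g a b else mv) mv) z := by
  obtain ⟨s, t, rfl⟩ := List.append_of_mem ha
  rw [List.foldl_append]
  simp only [List.foldl_cons]
  exact le_trans (mem_ifmax _ _ _ hb _) (le_nested _ _ _ _)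

-- ===== VERDICT (by name: the statement is the Claim_ definition above) =====
theorem max_linear_approximation_spec : Claim_equal_max_linear_approximation := by
  unfold Claim_equal_max_linear_approximation Spec_max_linear_approximation
  intro sbox n m _ _
  simp only [max_linear_approximation, max_linear_approximation_alt]
  have hSOpos : 0 < 2 ^ m.toNat := by positivity
  apply le_antisymm
  · refine nested_le
      (fun (a : Nat) (bb : Nat) => |((linear_approximation_table sbox n m).getD a []).getD bb 0|)
      (fun (_ : Nat) => List.range' 1 (2 ^ m.toNat - 1)) (List.range (2 ^ n.toNat)) 0 _
      (le_nested _ _ _ _) ?_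
    intro a ha bb hbb
    dsimp only
    have haR : a < 2 ^ n.toNat := List.mem_range.mp ha
    have hbR : bb < 2 ^ m.toNat := by
      have := (List.mem_range'_1.mp hbb).2; omega
    rw [latEntry sbox n m a bb haR hbR]
    have hlen : (fwht ((List.range (2 ^ n.toNat)).map (fun (x : Nat) =>
        if PySem.Int.bitCount (PySem.Int.band (bb : Int) ((PySem.List.pyGet? sbox (x : Int)).getD 0)) % 2 = 1
        then (-1 : Int) else 1))).length = 2 ^ n.toNat :=
      (fwht_spec n.toNat _ (by simp)).1
    have hmem : (fwht ((List.range (2 ^ n.toNat)).map (fun (x : Nat) =>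
        if PySem.Int.bitCount (PySem.Int.band (bb : Int) ((PySem.List.pyGet? sbox (x : Int)).getD 0)) % 2 = 1
        then (-1 : Int) else 1))).getD a 0
        ∈ fwht ((List.range (2 ^ n.toNat)).map (fun (x : Nat) =>
        if PySem.Int.bitCount (PySem.Int.band (bb : Int) ((PySem.List.pyGet? sbox (x : Int)).getD 0)) % 2 = 1
        then (-1 : Int) else 1)) := by
      rw [List.getD_eq_getElem _ _ (by omega)]
      exact List.getElem_mem _
    refine le_trans (le_of_eq ?_)
      (mem_nested
        (fun (_bb : Nat) (w : Int) => |PySem.Int.floordiv (w + ((2 ^ n.toNat : Nat) : Int)) 2 - ((2 ^ n.toNat >>> 1 : Nat) : Int)|)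
        (fun (b : Nat) => fwht ((List.range (2 ^ n.toNat)).map (fun (x : Nat) =>
          if PySem.Int.bitCount (PySem.Int.band (b : Int) ((PySem.List.pyGet? sbox (x : Int)).getD 0)) % 2 = 1
          then (-1 : Int) else 1)))
        (List.range' 1 (2 ^ m.toNat - 1)) bb hbb _ hmem 0)
    rw [wVal sbox n bb a haR]
    have h2c : (2 * cnt sbox (2 ^ n.toNat) a bb - ((2 ^ n.toNat : Nat) : Int))
        + ((2 ^ n.toNat : Nat) : Int) = 2 * cnt sbox (2 ^ n.toNat) a bb := by ring
    rw [h2c, PySem.Int.floordiv_eq_ediv_of_pos (by norm_num),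
      Int.mul_ediv_cancel_left _ (by norm_num)]
  · refine nested_le
      (fun (_bb : Nat) (w : Int) => |PySem.Int.floordiv (w + ((2 ^ n.toNat : Nat) : Int)) 2 - ((2 ^ n.toNat >>> 1 : Nat) : Int)|)
      (fun (b : Nat) => fwht ((List.range (2 ^ n.toNat)).map (fun (x : Nat) =>
          if PySem.Int.bitCount (PySem.Int.band (b : Int) ((PySem.List.pyGet? sbox (x : Int)).getD 0)) % 2 = 1
          then (-1 : Int) else 1)))
      (List.range' 1 (2 ^ m.toNat - 1)) 0 _
      (le_nested _ _ _ _) ?_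
    intro bb hbb w hw
    dsimp only at hw ⊢
    have hbR : bb < 2 ^ m.toNat := by
      have := (List.mem_range'_1.mp hbb).2; omega
    have hlen : (fwht ((List.range (2 ^ n.toNat)).map (fun (x : Nat) =>
        if PySem.Int.bitCount (PySem.Int.band (bb : Int) ((PySem.List.pyGet? sbox (x : Int)).getD 0)) % 2 = 1
        then (-1 : Int) else 1))).length = 2 ^ n.toNat :=
      (fwht_spec n.toNat _ (by simp)).1
    obtain ⟨i, hi, rfl⟩ := List.mem_iff_getElem.mp hw
    have hiSI : i < 2 ^ n.toNat := by omega
    rw [← List.getD_eq_getElem _ _ hi, wVal sbox n bb i hiSI]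
    have h2c : (2 * cnt sbox (2 ^ n.toNat) i bb - ((2 ^ n.toNat : Nat) : Int))
        + ((2 ^ n.toNat : Nat) : Int) = 2 * cnt sbox (2 ^ n.toNat) i bb := by ring
    rw [h2c, PySem.Int.floordiv_eq_ediv_of_pos (by norm_num),
      Int.mul_ediv_cancel_left _ (by norm_num)]
    rw [← latEntry sbox n m i bb hiSI hbR]
    exact mem_nested
      (fun (a : Nat) (bb : Nat) => |((linear_approximation_table sbox n m).getD a []).getD bb 0|)
      (fun (_ : Nat) => List.range' 1 (2 ^ m.toNat - 1)) (List.range (2 ^ n.toNat))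
      i (List.mem_range.mpr hiSI) bb hbb 0
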